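-- pv_equiv track=rewrite | github.com/yucori/Algorithm | Programmers/Level 1/133502.py | solution
-- ===== SOURCE A (Python) =====
-- def solution(ingredient):
--     answer = 0
--     idx = 0
--     while idx < len(ingredient) - 3:
--         if ingredient[idx:idx+4] == [1,2,3,1]:
--             answer += 1
--             del ingredient[idx:idx+4]
--             if idx < 4:
--                 idx = 0
--             else:
--                 idx -= 2
--         else:
--             idx += 1
--
--     return answer
-- ===== SOURCE B (Python) =====
-- def solution(ingredient):
--     stack = []
--     answer = 0
--     for x in ingredient:
--         stack.append(x)
--         if stack[-4:] == [1, 2, 3, 1]: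
--             del stack[-4:]
--             answer += 1
--     return answer
-- ===== Notes on version B (the rewrite author's own statement) =====
-- stated objective: faster
-- what changed: Replaces A's rescanning while-loop, which deletes each found [1,2,3,1] from the list and backtracks the index, with a single left-to-right pass pushing elements on a stack and popping/counting whenever the top four are [1,2,3,1].
import Mathlib
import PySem

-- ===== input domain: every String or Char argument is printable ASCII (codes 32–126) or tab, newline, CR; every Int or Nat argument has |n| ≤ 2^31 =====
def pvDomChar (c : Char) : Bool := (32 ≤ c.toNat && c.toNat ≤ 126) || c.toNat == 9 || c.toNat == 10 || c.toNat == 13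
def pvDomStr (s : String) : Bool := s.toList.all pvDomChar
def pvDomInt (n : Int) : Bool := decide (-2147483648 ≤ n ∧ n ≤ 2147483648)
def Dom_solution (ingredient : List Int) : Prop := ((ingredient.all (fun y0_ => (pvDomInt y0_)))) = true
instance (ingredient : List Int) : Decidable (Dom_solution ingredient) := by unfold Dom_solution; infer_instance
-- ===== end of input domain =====

-- B replaces A's delete-and-backtrack rescanning loop by a one-pass stack (objective: faster).
-- Note: Python A mutates its argument in place (del); the equivalence proved here is about the
-- RETURN value only.

-- ===== PORT A =====
-- A's loop: idx starts at 0 and never becomes negative (it is reset to 0 when idx < 4 and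
-- otherwise decreased by 2 from idx ≥ 4), so it is carried as a Nat; on these nonnegative
-- indices the arithmetic below coincides with Python's: ingredient[idx:idx+4] =
-- (l.drop idx).take 4, del ingredient[idx:idx+4] = l.take idx ++ l.drop (idx+4), and the
-- guard idx < len-3 is false in Python exactly when it is false under Nat truncation.
-- The loop terminates because 2*len(l) - idx strictly decreases (deletion shrinks the list by 4
-- and moves idx back by at most 2); the fuel parameter only makes that measure explicit for
-- structural recursion and is always sufficient at the call below — the computation is A's.
def solutionLoop : Nat → List Int → Nat → Int → Int
  | 0, _, _, answer => answer
  | fuel + 1, l, idx, answer =>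
    if idx < l.length - 3 then
      if (l.drop idx).take 4 = [1, 2, 3, 1] then
        solutionLoop fuel (l.take idx ++ l.drop (idx + 4))
          (if idx < 4 then 0 else idx - 2) (answer + 1)
      else
        solutionLoop fuel l (idx + 1) answer
    else
      answer

def solution (ingredient : List Int) : Int :=
  solutionLoop (2 * ingredient.length + 1) ingredient 0 0

-- ===== PORT B =====
-- one step of Source B's loop body: push x, then pop and count if the top four are [1,2,3,1]
-- (stack[-4:] = s.drop (s.length - 4), del stack[-4:] = s.take (s.length - 4))
def stepB (st : List Int × Int) (x : Int) : List Int × Int :=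
  let s := st.1 ++ [x]
  if s.drop (s.length - 4) = [1, 2, 3, 1] then (s.take (s.length - 4), st.2 + 1)
  else (s, st.2)

def solution_alt (ingredient : List Int) : Int :=
  (ingredient.foldl stepB ([], 0)).2

-- ===== PRECONDITION & SPEC =====
def Spec_solution (ingredient : List Int) (out : Int) : Prop := out = solution_alt ingredient
instance (ingredient : List Int) (out : Int) : Decidable (Spec_solution ingredient out) := by unfold Spec_solution; infer_instance

-- ===== CLAIM (what is proved, stated in full; the proofs are below) =====
def Claim_equal_solution : Prop := ∀ (ingredient : List Int), Dom_solution ingredient → Spec_solution ingredient (solution ingredient)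

-- ===== LEMMAS AND PROOFS =====

-- Occ l q: the pattern [1,2,3,1] occurs in l starting at position q (bounds included).
def Occ (l : List Int) (q : Nat) : Prop := (l.drop q).take 4 = [1, 2, 3, 1]

theorem occ_length {l : List Int} {q : Nat} (h : Occ l q) : q + 4 ≤ l.length := by
  have hl : ((l.drop q).take 4).length = 4 := by rw [h]; rfl
  rw [List.length_take, List.length_drop] at hl
  omega

theorem occ_append_left {a b : List Int} {q : Nat} (h : Occ a q) : Occ (a ++ b) q := by
  have hq := occ_length h
  unfold Occ at *
  rw [List.drop_append_of_le_length (by omega),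
      List.take_append_of_le_length (by rw [List.length_drop]; omega)]
  exact h

theorem occ_of_append {a b : List Int} {q : Nat} (hq : q + 4 ≤ a.length)
    (h : Occ (a ++ b) q) : Occ a q := by
  unfold Occ at *
  rwa [List.drop_append_of_le_length (by omega),
      List.take_append_of_le_length (by rw [List.length_drop]; omega)] at h

-- L1: while no occurrence of the pattern ends inside the freshly pushed part, stepB only pushes.
theorem foldl_no_pop (w : List Int) : ∀ (s : List Int) (c : Int),
    (∀ q, q + 4 > s.length → ¬ Occ (s ++ w) q) → w.foldl stepB (s, c) = (s ++ w, c) := by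
  induction w with
  | nil => intro s c _; simp
  | cons x w' ih =>
    intro s c hno
    have hnopop : ((s ++ [x]).drop ((s ++ [x]).length - 4)) ≠ [1, 2, 3, 1] := by
      intro hp
      have hlen : ((s ++ [x]).drop ((s ++ [x]).length - 4)).length = 4 := by rw [hp]; rfl
      rw [List.length_drop] at hlen
      have hsl : 3 ≤ s.length := by simp at hlen; omega
      apply hno (s.length - 3) (by omega)
      have hocc : Occ (s ++ [x]) (s.length - 3) := by
        unfold Occ
        have heq : (s ++ [x]).length - 4 = s.length - 3 := by simp only [List.length_append, List.length_cons, List.length_nil]; omega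
        rw [heq] at hp
        rw [List.take_of_length_le (by rw [List.length_drop]; simp only [List.length_append, List.length_cons, List.length_nil]; omega), hp]
      have hcons : s ++ x :: w' = (s ++ [x]) ++ w' := by simp
      rw [hcons]
      exact occ_append_left hocc
    have hstep : List.foldl stepB (s, c) (x :: w') = List.foldl stepB (s ++ [x], c) w' := by
      simp only [List.foldl_cons, stepB, if_neg hnopop]
    rw [hstep, ih (s ++ [x]) c (by
      intro q hq
      rw [List.append_assoc]
      exact hno q (by simp at hq ⊢; omega))]
    simp

-- L2: the count component is additive in its initial value; the stack part is independent of it.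
theorem foldl_count_shift (w : List Int) : ∀ (s : List Int) (c : Int),
    w.foldl stepB (s, c) = ((w.foldl stepB (s, 0)).1, c + (w.foldl stepB (s, 0)).2) := by
  induction w with
  | nil => intro s c; simp
  | cons x w' ih =>
    intro s c
    simp only [List.foldl_cons, stepB]
    split
    · rw [ih _ (c + 1), ih _ (0 + 1)]
      simp [Prod.ext_iff]; ring
    · exact ih _ c

-- pushing a non-1 element never makes the top four equal [1,2,3,1]
theorem push_ne (s : List Int) (x : Int) (hx : x ≠ 1) :
    (s ++ [x]).drop ((s ++ [x]).length - 4) ≠ [1, 2, 3, 1] := by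
  intro hp
  have hlen : ((s ++ [x]).drop ((s ++ [x]).length - 4)).length = 4 := by rw [hp]; rfl
  rw [List.length_drop] at hlen
  have hsl : 3 ≤ s.length := by simp at hlen; omega
  have heq : (s ++ [x]).length - 4 = s.length - 3 := by simp only [List.length_append, List.length_cons, List.length_nil]; omega
  rw [heq, List.drop_append_of_le_length (by omega)] at hp
  have := congrArg List.getLast? hp
  simp at this
  exact hx this

-- processing the four pattern elements from stack u pops them again and counts one,
-- provided u does not end with [1,2,3] followed (in the big list) by the pattern's 1
theorem foldl_pat (u : List Int) (c : Int)
    (h3 : (u ++ [1]).drop ((u ++ [1]).length - 4) ≠ [1, 2, 3, 1]) :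
    List.foldl stepB (u, c) [1, 2, 3, 1] = (u, c + 1) := by
  have s1 : stepB (u, c) 1 = (u ++ [1], c) := by
    simp only [stepB]; rw [if_neg h3]
  have s2 : stepB (u ++ [1], c) 2 = (u ++ [1, 2], c) := by
    simp only [stepB]; rw [if_neg (push_ne (u ++ [1]) 2 (by decide))]; simp
  have s3 : stepB (u ++ [1, 2], c) 3 = (u ++ [1, 2, 3], c) := by
    simp only [stepB]; rw [if_neg (push_ne (u ++ [1, 2]) 3 (by decide))]; simp
  have s4 : stepB (u ++ [1, 2, 3], c) 1 = (u, c + 1) := by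
    have hpop : ((u ++ [1, 2, 3]) ++ [(1 : Int)]).drop (((u ++ [1, 2, 3]) ++ [(1 : Int)]).length - 4)
        = [1, 2, 3, 1] := by
      have he : ((u ++ [1, 2, 3]) ++ [(1 : Int)]).length - 4 = u.length := by
        simp only [List.length_append, List.length_cons, List.length_nil]; omega
      have he2 : (u ++ [1, 2, 3]) ++ [(1 : Int)] = u ++ [1, 2, 3, 1] := by simp
      rw [he, he2]; simp
    simp only [stepB]
    rw [if_pos hpop]
    have he : ((u ++ [1, 2, 3]) ++ [(1 : Int)]).length - 4 = u.length := by
      simp only [List.length_append, List.length_cons, List.length_nil]; omega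
    have he2 : (u ++ [1, 2, 3]) ++ [(1 : Int)] = u ++ [1, 2, 3, 1] := by simp
    rw [he, he2]
    simp
  rw [List.foldl_cons, s1, List.foldl_cons, s2, List.foldl_cons, s3, List.foldl_cons, s4,
      List.foldl_nil]

-- L3: removing an occurrence before which nothing occurs costs the stack pass exactly one count
theorem countB_remove (u v : List Int)
    (hu : ∀ q, q < u.length → ¬ Occ (u ++ [1, 2, 3, 1] ++ v) q) :
    ((u ++ [1, 2, 3, 1] ++ v).foldl stepB (([] : List Int), (0 : Int))).2
      = 1 + ((u ++ v).foldl stepB (([] : List Int), (0 : Int))).2 := by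
  have hOccU : ∀ q, ¬ Occ u q := by
    intro q hocc
    have hq := occ_length hocc
    exact hu q (by omega) (occ_append_left (occ_append_left hocc))
  have hU : ∀ c : Int, u.foldl stepB ([], c) = (u, c) := by
    intro c
    have := foldl_no_pop u [] c (by intro q _ h; exact hOccU q (by simpa using h))
    simpa using this
  have h3 : (u ++ [(1 : Int)]).drop ((u ++ [(1 : Int)]).length - 4) ≠ [1, 2, 3, 1] := by
    intro hp
    have hlen : ((u ++ [(1 : Int)]).drop ((u ++ [(1 : Int)]).length - 4)).length = 4 := by
      rw [hp]; rfl
    rw [List.length_drop] at hlen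
    have hsl : 3 ≤ u.length := by simp at hlen; omega
    have heq : (u ++ [(1 : Int)]).length - 4 = u.length - 3 := by simp only [List.length_append, List.length_cons, List.length_nil]; omega
    rw [heq, List.drop_append_of_le_length (by omega)] at hp
    have hpre : u.drop (u.length - 3) = [1, 2, 3] := by
      have := congrArg List.dropLast hp
      simpa using this
    apply hu (u.length - 3) (by omega)
    unfold Occ
    have hd : (u ++ [1, 2, 3, 1] ++ v).drop (u.length - 3) = [1, 2, 3] ++ ([1, 2, 3, 1] ++ v) := by
      rw [List.append_assoc, List.drop_append_of_le_length (by omega), hpre]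
    rw [hd]
    simp
  have key1 : (u ++ [1, 2, 3, 1] ++ v).foldl stepB (([] : List Int), (0 : Int))
      = List.foldl stepB (u, 1) v := by
    rw [List.foldl_append, List.foldl_append, hU 0, foldl_pat u 0 h3]
    norm_num
  have key2 : (u ++ v).foldl stepB (([] : List Int), (0 : Int)) = List.foldl stepB (u, 0) v := by
    rw [List.foldl_append, hU 0]
  rw [key1, key2, foldl_count_shift v u 1]

-- L4: no occurrence at all gives count 0 and stack = whole list.
theorem countB_none (l : List Int) (h : ∀ q, ¬ Occ l q) :
    l.foldl stepB (([] : List Int), (0 : Int)) = (l, 0) := by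
  have := foldl_no_pop l [] 0 (by intro q _ hq; exact h q (by simpa using hq))
  simpa using this

-- invariant: no occurrence starts before idx
def LoopInv (l : List Int) (idx : Nat) : Prop := ∀ q, q < idx → ¬ Occ l q

theorem solutionLoop_eq (fuel : Nat) : ∀ (l : List Int) (idx : Nat) (answer : Int),
    2 * l.length - idx < fuel → LoopInv l idx →
    solutionLoop fuel l idx answer = answer + (l.foldl stepB ([], 0)).2 := by
  induction fuel with
  | zero => intro l idx answer hf _; omega
  | succ f ih =>
    intro l idx answer hf hinv
    rw [solutionLoop]
    by_cases hguard : idx < l.length - 3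
    · rw [if_pos hguard]
      by_cases hm : (l.drop idx).take 4 = [1, 2, 3, 1]
      · rw [if_pos hm]
        -- the slice matches: A deletes it; the stack pass counts exactly one for it
        have hlen4 : ((l.drop idx).take 4).length = 4 := by rw [hm]; rfl
        rw [List.length_take, List.length_drop] at hlen4
        have hidx4 : idx + 4 ≤ l.length := by omega
        have hsplit : l = l.take idx ++ [1, 2, 3, 1] ++ l.drop (idx + 4) := by
          conv_lhs => rw [← List.take_append_drop idx l]
          rw [List.append_assoc]
          congr 1
          conv_lhs => rw [← List.take_append_drop 4 (l.drop idx)]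
          rw [hm, List.drop_drop]
        have htklen : (l.take idx).length = idx := by rw [List.length_take]; omega
        -- the invariant survives the deletion and backtracking
        have hinv' : LoopInv (l.take idx ++ l.drop (idx + 4)) (if idx < 4 then 0 else idx - 2) := by
          intro q hq hocc
          have hq' : q + 3 ≤ idx := by split at hq <;> omega
          by_cases hc : q + 4 ≤ idx
          · exact hinv q (by omega) (by
              rw [hsplit, List.append_assoc]
              have : Occ (l.take idx) q := occ_of_append (by omega) hocc
              exact occ_append_left this)
          · -- q = idx - 3: the window straddles the deletion point
            have hq3 : q = idx - 3 ∧ 3 ≤ idx := by omega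
            obtain ⟨rfl, h3i⟩ := hq3
            unfold Occ at hocc
            rw [List.drop_append_of_le_length (by omega)] at hocc
            have hdl : ((l.take idx).drop (idx - 3)).length = 3 := by
              rw [List.length_drop, htklen]; omega
            have hpre : (l.take idx).drop (idx - 3) = [1, 2, 3] ∧
                (l.drop (idx + 4)).take 1 = [1] := by
              have hsp : (l.take idx).drop (idx - 3) ++ (l.drop (idx + 4)).take 1
                  = [1, 2, 3] ++ [1] := by
                have := hocc
                rw [List.take_append, hdl,
                    List.take_of_length_le (by rw [hdl]; omega)] at this
                simpa using this
              have := List.append_inj hsp (by rw [hdl]; rfl)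
              exact ⟨this.1, this.2⟩
            apply hinv (idx - 3) (by omega)
            unfold Occ
            rw [hsplit, List.append_assoc, List.drop_append_of_le_length (by omega), hpre.1]
            simp
        have hfuel' : 2 * (l.take idx ++ l.drop (idx + 4)).length
            - (if idx < 4 then 0 else idx - 2) < f := by
          rw [List.length_append, htklen, List.length_drop]
          split <;> omega
        rw [ih _ _ _ hfuel' hinv']
        have hcount : (l.foldl stepB ([], 0)).2
            = 1 + ((l.take idx ++ l.drop (idx + 4)).foldl stepB ([], 0)).2 := by
          conv_lhs => rw [hsplit]
          apply countB_remove
          intro q hq hocc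
          rw [← hsplit] at hocc
          exact hinv q (by omega) hocc
        rw [hcount]
        ring
      · rw [if_neg hm]
        -- the slice does not match: extend the invariant by one position
        refine ih _ _ _ (by omega) ?_
        intro q hq
        rcases Nat.lt_or_ge q idx with h | h
        · exact hinv q h
        · have : q = idx := by omega
          subst this
          exact hm
    · rw [if_neg hguard]
      -- loop exit: idx ≥ len - 3, so together with the invariant nothing occurs at all
      have hnone : ∀ q, ¬ Occ l q := by
        intro q hocc
        have := occ_length hocc
        exact hinv q (by omega) hocc
      rw [countB_none l hnone]
      simp

-- ===== VERDICT (by name: the statement is the Claim_ definition above) =====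
theorem solution_spec : Claim_equal_solution := by
  intro ingredient _
  unfold Spec_solution solution solution_alt
  rw [solutionLoop_eq (2 * ingredient.length + 1) ingredient 0 0 (by omega) (by intro q hq; omega)]
  simp
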